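-- pv_equiv track=rewrite | github.com/MarcosBianchii/Teoria-de-Algoritmos | parciales/2024_02_26/1.py | laberinto
-- ===== SOURCE A (Python) =====
-- def laberinto(tablero, V):
--     n = len(tablero)
--     m = len(tablero[0])
--
--     mem = [[0] * (m + 1) for _ in range(n + 1)]
--     mem[0][1] = V
--
--     for i in range(1, n + 1):
--         for j in range(1, m + 1):
--             mem[i][j] = max(mem[i - 1][j], mem[i][j - 1]) - \
--                 tablero[i - 1][j - 1]
--
--     return mem[n][m], construir_solucion(mem, n, m)
--
-- def construir_solucion(mem, n, m):
--     sol = []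
--
--     while n > 1 and m > 1:
--         if mem[n - 1][m] > mem[n][m - 1]:
--             sol.append("abajo")
--             n -= 1
--         else:
--             sol.append("derecha")
--             m -= 1
--
--     for _ in range(n, 1, -1):
--         sol.append("abajo")
--
--     for _ in range(m, 1, -1):
--         sol.append("derecha")
--
--     sol.reverse()
--     return sol
-- ===== SOURCE B (Python) =====
-- def laberinto(tablero, V):
--     n = len(tablero)
--     m = len(tablero[0])
--
--     # build the DP table row by row: each new row is a left-to-right scan of the previous one
--     prev = [0, V] + [0] * (m - 1)
--     table = [prev]
--     for fila in tablero:
--         cur = [0]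
--         for j in range(1, m + 1):
--             cur.append(max(prev[j], cur[j - 1]) - fila[j - 1])
--         prev = cur
--         table.append(cur)
--
--     return prev[m], camino(table, n, m)
--
-- def camino(mem, n, m):
--     # recursive reconstruction, already in forward order
--     if n > 1 and m > 1:
--         if mem[n - 1][m] > mem[n][m - 1]:
--             return camino(mem, n - 1, m) + ["abajo"]
--         return camino(mem, n, m - 1) + ["derecha"]
--     return ["derecha"] * (m - 1) + ["abajo"] * (n - 1)
-- ===== Notes on version B (the rewrite author's own statement) =====
-- stated objective: alternative
-- what changed: B builds the DP table functionally row by row with a left-to-right scan carrying the previous row (no preallocated mutated 2D array with index arithmetic) and reconstructs the path by direct recursion that emits moves already in forward order, instead of A's backward while-loop plus two border loops and a final reverse.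
import Mathlib
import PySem

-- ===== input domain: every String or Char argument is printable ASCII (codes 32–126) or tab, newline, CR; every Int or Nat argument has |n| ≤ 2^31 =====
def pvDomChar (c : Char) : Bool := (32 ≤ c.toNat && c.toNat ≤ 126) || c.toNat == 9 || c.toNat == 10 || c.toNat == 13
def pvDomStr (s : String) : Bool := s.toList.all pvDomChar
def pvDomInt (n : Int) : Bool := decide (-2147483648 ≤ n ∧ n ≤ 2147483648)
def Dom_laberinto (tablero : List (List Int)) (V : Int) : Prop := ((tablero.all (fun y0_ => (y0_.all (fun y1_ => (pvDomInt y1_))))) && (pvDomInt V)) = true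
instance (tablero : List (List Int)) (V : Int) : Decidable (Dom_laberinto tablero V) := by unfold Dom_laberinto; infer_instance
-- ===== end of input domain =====

-- B builds the DP table functionally row by row and reconstructs the path by direct
-- recursion in forward order, instead of A's mutated 2D array and backward loop + reverse
-- (objective: alternative decomposition, same asymptotic cost).

-- ===== PORT A =====
-- mem[i][j] = v  (Python list-of-lists assignment)
def pySet2 (mem : List (List Int)) (i j : Int) (v : Int) : List (List Int) :=
  PySem.List.pySetD mem i (PySem.List.pySetD (PySem.List.pyGetD mem i []) j v)

-- the 'while n > 1 and m > 1' loop of construir_solucion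
def construirLoop (mem : List (List Int)) (n m : Nat) (sol : List String) :
    Nat × Nat × List String :=
  if 1 < n ∧ 1 < m then
    if PySem.List.pyGetD (PySem.List.pyGetD mem ((n : Int) - 1) []) (m : Int) 0 >
       PySem.List.pyGetD (PySem.List.pyGetD mem (n : Int) []) ((m : Int) - 1) 0 then
      construirLoop mem (n - 1) m (sol ++ ["abajo"])
    else
      construirLoop mem n (m - 1) (sol ++ ["derecha"])
  else (n, m, sol)
termination_by n + m
decreasing_by all_goals omega

-- the code after the while loop: the two border for-loops and the final reverse
def csFinish (r : Nat × Nat × List String) : List String :=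
  ((PySem.List.pyRange (r.2.1 : Int) 1 (-1)).foldl (fun s _ => s ++ ["derecha"])
    ((PySem.List.pyRange (r.1 : Int) 1 (-1)).foldl (fun s _ => s ++ ["abajo"]) r.2.2)).reverse

def construir_solucion (mem : List (List Int)) (n m : Nat) : List String :=
  csFinish (construirLoop mem n m [])

def laberinto (tablero : List (List Int)) (V : Int) : Int × List String :=
  let n := tablero.length
  let m := (PySem.List.pyGetD tablero 0 []).length
  let mem0 : List (List Int) := List.replicate (n + 1) (List.replicate (m + 1) 0)
  let mem1 := pySet2 mem0 0 1 V
  let mem := (PySem.List.pyRange 1 ((n : Int) + 1) 1).foldl (fun mem i =>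
    (PySem.List.pyRange 1 ((m : Int) + 1) 1).foldl (fun mem j =>
      pySet2 mem i j
        (max (PySem.List.pyGetD (PySem.List.pyGetD mem (i - 1) []) j 0)
             (PySem.List.pyGetD (PySem.List.pyGetD mem i []) (j - 1) 0)
         - PySem.List.pyGetD (PySem.List.pyGetD tablero (i - 1) []) (j - 1) 0)) mem) mem1
  (PySem.List.pyGetD (PySem.List.pyGetD mem (n : Int) []) (m : Int) 0,
   construir_solucion mem n m)

-- ===== PORT B =====
-- recursive forward reconstruction ('camino' in Source B)
def caminoB (mem : List (List Int)) (n m : Nat) : List String :=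
  if 1 < n ∧ 1 < m then
    if PySem.List.pyGetD (PySem.List.pyGetD mem ((n : Int) - 1) []) (m : Int) 0 >
       PySem.List.pyGetD (PySem.List.pyGetD mem (n : Int) []) ((m : Int) - 1) 0 then
      caminoB mem (n - 1) m ++ ["abajo"]
    else
      caminoB mem n (m - 1) ++ ["derecha"]
  else List.replicate (m - 1) "derecha" ++ List.replicate (n - 1) "abajo"
termination_by n + m
decreasing_by all_goals omega

-- the inner 'for j in range(1, m+1)' scan building one row from the previous one
def nextRow (m : Nat) (prev fila : List Int) : List Int :=
  (PySem.List.pyRange 1 ((m : Int) + 1) 1).foldl (fun cur j =>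
    cur ++ [max (PySem.List.pyGetD prev j 0) (PySem.List.pyGetD cur (j - 1) 0)
            - PySem.List.pyGetD fila (j - 1) 0]) [0]

def laberinto_alt (tablero : List (List Int)) (V : Int) : Int × List String :=
  let n := tablero.length
  let m := (PySem.List.pyGetD tablero 0 []).length
  let row0 : List Int := [0, V] ++ List.replicate (m - 1) 0
  let st := tablero.foldl (fun (s : List Int × List (List Int)) fila =>
      (nextRow m s.1 fila, s.2 ++ [nextRow m s.1 fila])) (row0, [row0])
  (PySem.List.pyGetD st.1 (m : Int) 0, caminoB st.2 n m)

-- ===== PRECONDITION & SPEC =====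
-- Pre_ excludes exactly the inputs where Python A raises IndexError: an empty board or a
-- first row of length 0 (mem[0][1] out of range), and boards with a row shorter than the
-- first row (tablero[i-1][j-1] out of range).
def Pre_laberinto (tablero : List (List Int)) (V : Int) : Prop :=
  1 ≤ (tablero.headD []).length ∧
  ∀ row ∈ tablero, (tablero.headD []).length ≤ row.length

instance (tablero : List (List Int)) (V : Int) : Decidable (Pre_laberinto tablero V) := by
  unfold Pre_laberinto; infer_instance

def pvWitness_laberinto : List (List Int) × Int := ([[1, 2], [3, 4]], 5)

def Spec_laberinto (tablero : List (List Int)) (V : Int) (out : Int × List String) : Prop :=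
  out = laberinto_alt tablero V
instance (tablero : List (List Int)) (V : Int) (out : Int × List String) :
    Decidable (Spec_laberinto tablero V out) := by unfold Spec_laberinto; infer_instance

-- ===== CLAIM (what is proved, stated in full; the proofs are below) =====
def Claim_equal_laberinto : Prop := ∀ (tablero : List (List Int)) (V : Int),
  Dom_laberinto tablero V → Pre_laberinto tablero V →
  Spec_laberinto tablero V (laberinto tablero V)

-- ===== LEMMAS AND PROOFS =====

-- the cells of one DP row, recursively (rc prev fila l = first l+1 cells of the new row)
def rc (prev fila : List Int) : Nat → List Int
  | 0 => [0]
  | l + 1 => rc prev fila l ++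
      [max (prev.getD (l + 1) 0) ((rc prev fila l).getD l 0) - fila.getD l 0]

-- the rows of the DP table below row 0, and the last row
def rowsA (m : Nat) : List (List Int) → List Int → List (List Int)
  | [], _ => []
  | f :: t, p => rc p f m :: rowsA m t (rc p f m)

def lastA (m : Nat) : List (List Int) → List Int → List Int
  | [], p => p
  | f :: t, p => lastA m t (rc p f m)

theorem length_rc (prev fila : List Int) (l : Nat) : (rc prev fila l).length = l + 1 := by
  induction l with
  | zero => rfl
  | succ l ih => simp [rc, ih]

theorem nextRow_eq_rc (m : Nat) (prev fila : List Int) :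
    nextRow m prev fila = rc prev fila m := by
  unfold nextRow
  induction m with
  | zero => rw [show ((0:Nat):Int) + 1 = 1 by norm_num, PySem.List.pyRange_one_eq_nil (by norm_num)]; rfl
  | succ l ih =>
      rw [show ((l+1:Nat):Int) + 1 = (((l:Nat):Int) + 1) + 1 by push_cast; ring,
          PySem.List.pyRange_one_succ_right (by omega), List.foldl_append, ih]
      simp only [List.foldl_cons, List.foldl_nil]
      rw [show ((l:Nat):Int) + 1 = ((l+1:Nat):Int) by push_cast; ring]
      simp [rc, PySem.List.pyGetD_natCast]
      rw [show ((l:Nat):Int) + 1 = ((l+1:Nat):Int) by push_cast; ring, PySem.List.pyGetD_natCast]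
      simp [List.getD_eq_getElem?_getD]

theorem foldB_eq (m : Nat) (l : List (List Int)) (p : List Int) (acc : List (List Int)) :
    l.foldl (fun (s : List Int × List (List Int)) fila =>
      (nextRow m s.1 fila, s.2 ++ [nextRow m s.1 fila])) (p, acc)
    = (lastA m l p, acc ++ rowsA m l p) := by
  induction l generalizing p acc with
  | nil => simp [lastA, rowsA]
  | cons f t ih =>
      simp only [List.foldl_cons, nextRow_eq_rc]
      have := ih (rc p f m) (acc ++ [rc p f m])
      simp only [nextRow_eq_rc] at this
      rw [this]; simp [lastA, rowsA]

theorem getLast?_cons_rowsA (m : Nat) (l : List (List Int)) (p : List Int) :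
    (p :: rowsA m l p).getLast? = some (lastA m l p) := by
  induction l generalizing p with
  | nil => simp [rowsA, lastA]
  | cons f t ih => simpa [rowsA, lastA] using ih (rc p f m)

theorem rowsA_append (m : Nat) (l : List (List Int)) (f : List Int) (p : List Int) :
    rowsA m (l ++ [f]) p = rowsA m l p ++ [rc (lastA m l p) f m] := by
  induction l generalizing p with
  | nil => simp [rowsA, lastA]
  | cons g t ih => simp [rowsA, lastA, ih]

theorem getD_last_of_getLast? {α : Type} [Inhabited α] (pre : List α) (prev : α)
    (h : pre.getLast? = some prev) (d : α) : pre.getD (pre.length - 1) d = prev := by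
  rw [List.getLast?_eq_getElem?] at h
  simp [List.getD_eq_getElem?_getD, h]

theorem getD_append_length {α : Type} [Inhabited α] (a : List α) (x : α) (b : List α) (d : α) :
    (a ++ x :: b).getD a.length d = x := by
  simp [List.getD_eq_getElem?_getD]

theorem set_append_length {α : Type} (a : List α) (x y : α) (b : List α) :
    (a ++ x :: b).set a.length y = a ++ y :: b := by
  rw [List.set_append_right _ _ (Nat.le_refl _)]
  simp

-- the inner for-loop of A fills one zero row of the table into the corresponding rc row
theorem innerA (m : Nat) (pre post : List (List Int)) (prev fila : List Int)
    (tablero : List (List Int)) (i : Int) (hi : i = (pre.length : Int))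
    (hlast : pre.getLast? = some prev)
    (hfila : PySem.List.pyGetD tablero (i - 1) [] = fila) :
    ∀ l, l ≤ m →
    (PySem.List.pyRange 1 ((l : Int) + 1) 1).foldl (fun mem j =>
      pySet2 mem i j
        (max (PySem.List.pyGetD (PySem.List.pyGetD mem (i - 1) []) j 0)
             (PySem.List.pyGetD (PySem.List.pyGetD mem i []) (j - 1) 0)
         - PySem.List.pyGetD (PySem.List.pyGetD tablero (i - 1) []) (j - 1) 0))
      (pre ++ List.replicate (m + 1) 0 :: post)
    = pre ++ (rc prev fila l ++ List.replicate (m - l) 0) :: post := by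
  intro l
  induction l with
  | zero =>
      intro _
      rw [show ((0:Nat):Int) + 1 = 1 by norm_num, PySem.List.pyRange_one_eq_nil (by norm_num)]
      simp [rc, List.replicate_succ]
  | succ l ih =>
      intro hl
      have hpre : pre ≠ [] := by intro h; rw [h] at hlast; simp at hlast
      have hlen1 : 1 ≤ pre.length := List.length_pos_iff.mpr hpre
      rw [show ((l+1:Nat):Int) + 1 = (((l:Nat):Int) + 1) + 1 by push_cast; ring,
          PySem.List.pyRange_one_succ_right (by omega), List.foldl_append, ih (by omega)]
      simp only [List.foldl_cons, List.foldl_nil]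
      rw [show ((l:Nat):Int) + 1 = ((l+1:Nat):Int) by push_cast; ring]
      rw [hfila]
      have hSi : PySem.List.pyGetD
          (pre ++ (rc prev fila l ++ List.replicate (m - l) 0) :: post) i [] =
          rc prev fila l ++ List.replicate (m - l) 0 := by
        rw [hi, PySem.List.pyGetD_natCast]
        exact getD_append_length _ _ _ _
      have hSi1 : PySem.List.pyGetD
          (pre ++ (rc prev fila l ++ List.replicate (m - l) 0) :: post) (i - 1) [] = prev := by
        rw [hi, show ((pre.length:Int) - 1) = ((pre.length - 1 : Nat) : Int) by omega,
            PySem.List.pyGetD_natCast,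
            List.getD_append _ _ _ _ (by omega)]
        exact getD_last_of_getLast? pre prev hlast []
      unfold pySet2
      rw [hSi, hSi1]
      rw [show ((l+1:Nat):Int) - 1 = ((l:Nat):Int) by push_cast; ring]
      rw [hi]
      simp only [PySem.List.pyGetD_natCast, PySem.List.pySetD_natCast]
      rw [List.getD_append _ _ _ _ (by rw [length_rc]; omega)]
      rw [show m - l = (m - (l+1)) + 1 by omega, List.replicate_succ]
      rw [show l + 1 = (rc prev fila l).length from (length_rc prev fila l).symm]
      rw [set_append_length, set_append_length]
      simp [rc, length_rc]

theorem length_rowsA (m : Nat) (l : List (List Int)) (p : List Int) :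
    (rowsA m l p).length = l.length := by
  induction l generalizing p with
  | nil => rfl
  | cons f t ih => simp [rowsA, ih]

-- the outer loop of A builds the table row by row
theorem outerA (tablero : List (List Int)) (m : Nat) (row0 : List Int) :
    ∀ k, k ≤ tablero.length →
    (PySem.List.pyRange 1 ((k : Int) + 1) 1).foldl (fun mem i =>
      (PySem.List.pyRange 1 ((m : Int) + 1) 1).foldl (fun mem j =>
        pySet2 mem i j
          (max (PySem.List.pyGetD (PySem.List.pyGetD mem (i - 1) []) j 0)
               (PySem.List.pyGetD (PySem.List.pyGetD mem i []) (j - 1) 0)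
           - PySem.List.pyGetD (PySem.List.pyGetD tablero (i - 1) []) (j - 1) 0)) mem)
      (row0 :: List.replicate tablero.length (List.replicate (m + 1) 0))
    = (row0 :: rowsA m (tablero.take k) row0)
      ++ List.replicate (tablero.length - k) (List.replicate (m + 1) 0) := by
  intro k
  induction k with
  | zero =>
      intro _
      rw [show ((0:Nat):Int) + 1 = 1 by norm_num,
          show (PySem.List.pyRange 1 1 1 : List Int) = [] from
            PySem.List.pyRange_one_eq_nil (by norm_num)]
      simp [rowsA]
  | succ k ih =>
      intro hk
      have hkl : k < tablero.length := by omega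
      rw [show ((k+1:Nat):Int) + 1 = (((k:Nat):Int) + 1) + 1 by push_cast; ring,
          show (PySem.List.pyRange 1 ((((k:Nat):Int) + 1) + 1) 1 : List Int) =
              PySem.List.pyRange 1 (((k:Nat):Int) + 1) 1 ++ [((k:Nat):Int) + 1] from
            PySem.List.pyRange_one_succ_right (by omega),
          List.foldl_append, ih (by omega)]
      simp only [List.foldl_cons, List.foldl_nil]
      rw [show tablero.length - k = (tablero.length - (k+1)) + 1 by omega, List.replicate_succ]
      rw [innerA m (row0 :: rowsA m (tablero.take k) row0)
            (List.replicate (tablero.length - (k+1)) (List.replicate (m+1) 0))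
            (lastA m (tablero.take k) row0) (tablero.getD k []) tablero (((k:Nat):Int) + 1)
            (by simp [length_rowsA, List.length_take, Nat.min_eq_left (le_of_lt hkl)])
            (getLast?_cons_rowsA m (tablero.take k) row0)
            (by rw [show (((k:Nat):Int) + 1) - 1 = ((k:Nat):Int) by ring, PySem.List.pyGetD_natCast])
            m (le_refl m)]
      have htake : List.take (k+1) tablero = List.take k tablero ++ [tablero[k]] := by
        rw [List.take_add_one]
        simp [List.getElem?_eq_getElem hkl]
      rw [htake, rowsA_append]
      simp [List.getD_eq_getElem?_getD, List.getElem?_eq_getElem hkl]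

-- the while loop + border loops + reverse of A compute caminoB
theorem csFinish_eq_caminoB (mem : List (List Int)) :
    ∀ n m sol, csFinish (construirLoop mem n m sol) = caminoB mem n m ++ sol.reverse := by
  intro n m sol
  fun_induction construirLoop mem n m sol with
  | case1 n m sol h hgt ih =>
      rw [caminoB, if_pos h, if_pos hgt, ih]
      simp
  | case2 n m sol h hgt ih =>
      rw [caminoB, if_pos h, if_neg hgt, ih]
      simp
  | case3 n m sol h =>
      rw [caminoB, if_neg h]
      unfold csFinish
      rw [PySem.List.foldl_append_singleton_eq_map, PySem.List.foldl_append_singleton_eq_map]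
      simp [PySem.List.pyRange_neg_one, List.reverse_append, Function.comp_def,
            List.map_const', List.reverse_replicate, List.length_range,
            show ((n:Int) - 1).toNat = n - 1 by omega, show ((m:Int) - 1).toNat = m - 1 by omega]

theorem pySet2_zero_one (x : List Int) (rest : List (List Int)) (V : Int) :
    pySet2 (x :: rest) 0 1 V = x.set 1 V :: rest := by
  unfold pySet2
  rw [PySem.List.pyGetD_zero_cons,
      show PySem.List.pySetD x 1 V = x.set 1 V from
        PySem.List.pySetD_of_nonneg x V (by norm_num),
      show PySem.List.pySetD (x :: rest) 0 (x.set 1 V) = (x :: rest).set 0 (x.set 1 V) from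
        PySem.List.pySetD_of_nonneg _ _ (by norm_num)]
  rfl

theorem set1_replicate (mm : Nat) (V : Int) (h : 1 ≤ mm) :
    (List.replicate (mm + 1) (0:Int)).set 1 V = [0, V] ++ List.replicate (mm - 1) 0 := by
  obtain ⟨m', rfl⟩ : ∃ m', mm = m' + 1 := ⟨mm - 1, by omega⟩
  simp [List.replicate_succ]

-- ===== VERDICT (by name: the statement is the Claim_ definition above) =====
theorem laberinto_spec : Claim_equal_laberinto := by
  unfold Claim_equal_laberinto
  intro tablero V _hdom hpre
  obtain ⟨hm1, -⟩ := hpre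
  unfold Spec_laberinto
  have hget0 : PySem.List.pyGetD tablero 0 [] = tablero.headD [] := by
    cases tablero <;> simp [PySem.List.pyGetD_zero, List.getD]
  simp only [laberinto, laberinto_alt]
  set m := (PySem.List.pyGetD tablero 0 []).length with hm
  have hm1' : 1 ≤ m := by rw [hm, hget0]; exact hm1
  set n := tablero.length with hn
  set row0 : List Int := [0, V] ++ List.replicate (m - 1) 0 with hrow0
  have h1 : pySet2 (List.replicate (n + 1) (List.replicate (m + 1) 0)) 0 1 V
      = row0 :: List.replicate n (List.replicate (m + 1) 0) := by
    rw [List.replicate_succ, pySet2_zero_one, set1_replicate m V hm1']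
  rw [h1]
  rw [outerA tablero m row0 tablero.length (le_refl _)]
  rw [foldB_eq m tablero row0 [row0]]
  simp only [List.take_length, Nat.sub_self, List.replicate_zero, List.append_nil,
             List.singleton_append]
  have hmemget : PySem.List.pyGetD (row0 :: rowsA m tablero row0) (n : Int) []
      = lastA m tablero row0 := by
    rw [PySem.List.pyGetD_natCast,
        show n = (row0 :: rowsA m tablero row0).length - 1 by simp [length_rowsA, hn]]
    exact getD_last_of_getLast? _ _ (getLast?_cons_rowsA m tablero row0) []
  rw [hmemget]
  have hsol : construir_solucion (row0 :: rowsA m tablero row0) n m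
      = caminoB (row0 :: rowsA m tablero row0) n m := by
    unfold construir_solucion
    rw [csFinish_eq_caminoB]
    simp
  rw [hsol]
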